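-- pv_equiv track=rewrite | github.com/trevorWieland/poketypes | poketypes/protos/protogen.py | protogen_conditions
-- ===== SOURCE A (Python) =====
-- from typing import Dict
--
-- def protogen_conditions(condition_data: Dict[str, Dict]) -> str:
--     """Generate a protobuf formatted string with Enum info for conditions information.
--
--     Built expecting parsed data from conditions.ts showdown information.
--     This function is highly likely to need to be changed, as better definitions of volatile keys are worked on.
--     Weather, Status, and Conditions can be pulled from here, though it might not contain all volatile statuses :/
--
--     Args:
--         condition_data (Dict[str, Dict]): A dict mapping condition keys to some (mostly) arbitrary data structure.
--
--     Returns: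
--         str: A multi-line string containing a properly formatted Enum.
--     """
--     # Section comments
--     proto_str = ""
--
--     # Start Enum Construction for Statuses
--     proto_str += "//Contains data for Pokemon Statuses\n"
--
--     proto_str += "enum DexStatus {\n"
--     proto_str += "\tSTATUS_UNASSIGNED = 0;\n"
--
--     proto_str += "\tSTATUS_FNT = 1;\n"
--
--     filtered_data = {k: v for k, v in condition_data.items() if v.get("effectType") == "Status"}
--
--     # Add each type to the enum
--     for e, key in enumerate(filtered_data.keys()):
--         proto_str += f"\tSTATUS_{key.upper()} = {e+2};\n"
--
--     # Finalize the enum with a closing bracket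
--     proto_str += "}\n\n"
--
--     # Start Enum Construction for Weathers
--     proto_str += "//Contains data for Pokemon Weathers\n"
--
--     proto_str += "enum DexWeather {\n"
--     proto_str += "\tWEATHER_UNASSIGNED = 0;\n"
--     proto_str += "\tWEATHER_NONE = 1;\n"
--
--     filtered_data = {k: v for k, v in condition_data.items() if v.get("effectType") == "Weather"}
--
--     # Add each type to the enum
--     for e, key in enumerate(filtered_data.keys()):
--         proto_str += f"\tWEATHER_{key.upper()} = {e+2};\n"
--
--     # Finalize the enum with a closing bracket
--     proto_str += "}\n\n"
--
--     # Start Enum Construction for Weathers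
--     proto_str += "//Contains data for Pokemon Conditions\n"
--
--     proto_str += "enum DexCondition {\n"
--     proto_str += "\tCONDITION_UNASSIGNED = 0;\n"
--
--     filtered_data = {k: v for k, v in condition_data.items() if v.get("effectType") is None}
--
--     # Add each type to the enum
--     for e, key in enumerate(filtered_data.keys()):
--         proto_str += f"\tCONDITION_{key.upper()} = {e+1};\n"
--
--     # Finalize the enum with a closing bracket
--     proto_str += "}\n\n"
--
--     return proto_str
-- ===== SOURCE B (Python) =====
-- from typing import Dict
--
--
-- def protogen_conditions(condition_data: Dict[str, Dict]) -> str: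
--     """Generate a protobuf formatted string with Enum info for conditions information.
--
--     One classifying pass over condition_data, then three enum blocks emitted by a shared helper.
--     """
--     statuses, weathers, conditions = [], [], []
--     for key, value in condition_data.items():
--         effect_type = value.get("effectType")
--         if effect_type == "Status":
--             statuses.append(key)
--         elif effect_type == "Weather":
--             weathers.append(key)
--         elif effect_type is None:
--             conditions.append(key)
--
--     def block(title, name, prelude, prefix, keys, start):
--         lines = [f"//Contains data for Pokemon {title}\n", f"enum {name} {{\n"]
--         lines += prelude
--         lines += [f"\t{prefix}_{key.upper()} = {i};\n" for i, key in enumerate(keys, start)]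
--         lines.append("}\n\n")
--         return "".join(lines)
--
--     return (
--         block("Statuses", "DexStatus", ["\tSTATUS_UNASSIGNED = 0;\n", "\tSTATUS_FNT = 1;\n"], "STATUS", statuses, 2)
--         + block("Weathers", "DexWeather", ["\tWEATHER_UNASSIGNED = 0;\n", "\tWEATHER_NONE = 1;\n"], "WEATHER", weathers, 2)
--         + block("Conditions", "DexCondition", ["\tCONDITION_UNASSIGNED = 0;\n"], "CONDITION", conditions, 1)
--     )
-- ===== Notes on version B (the rewrite author's own statement) =====
-- stated objective: alternative
-- what changed: A builds the string with three separate dict-comprehension scans interleaved with emission; B makes one classifying pass that bins every key by its effectType and then emits the three enum blocks through a shared join-based block helper.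
import Mathlib
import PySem

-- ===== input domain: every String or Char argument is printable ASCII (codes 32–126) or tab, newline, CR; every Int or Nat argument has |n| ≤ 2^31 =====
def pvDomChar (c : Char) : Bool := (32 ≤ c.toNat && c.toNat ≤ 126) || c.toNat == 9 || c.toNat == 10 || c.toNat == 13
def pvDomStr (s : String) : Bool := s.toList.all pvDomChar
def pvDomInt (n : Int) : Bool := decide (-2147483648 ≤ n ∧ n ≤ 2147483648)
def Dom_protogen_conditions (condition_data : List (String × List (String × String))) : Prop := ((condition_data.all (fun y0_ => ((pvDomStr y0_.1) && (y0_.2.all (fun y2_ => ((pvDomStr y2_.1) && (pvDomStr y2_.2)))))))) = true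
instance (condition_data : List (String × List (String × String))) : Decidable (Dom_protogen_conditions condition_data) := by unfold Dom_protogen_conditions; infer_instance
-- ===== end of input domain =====

-- B replaces A's three dict-comprehension scans by one classifying pass plus a shared
-- block-emission helper (objective: alternative decomposition, same asymptotic cost).

-- ===== PORT A =====
-- v.get("effectType") — first-match association-list lookup (Python dict.get)
def pvGetEffect (v : List (String × String)) : Option String :=
  (PySem.Dict.mk v).get? "effectType"

-- one enum line of A:  "\t<PREFIX>_<KEY.upper()> = <i>;\n"
def pvLineA (pre : String) (ik : Int × String) : String :=
  "\t" ++ pre ++ "_" ++ PySem.Str.upper ik.2 ++ " = " ++ PySem.Int.toStr ik.1 ++ ";\n"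

def protogen_conditions (condition_data : List (String × List (String × String))) : String :=
  let proto_str := ""
  let proto_str := proto_str ++ "//Contains data for Pokemon Statuses\n"
  let proto_str := proto_str ++ "enum DexStatus {\n"
  let proto_str := proto_str ++ "\tSTATUS_UNASSIGNED = 0;\n"
  let proto_str := proto_str ++ "\tSTATUS_FNT = 1;\n"
  let filtered_data := condition_data.foldl
    (fun d p => if pvGetEffect p.2 == some "Status" then d.insert p.1 p.2 else d) PySem.Dict.empty
  let proto_str := (PySem.List.enumerate filtered_data.keys 0).foldl
    (fun s ek => s ++ pvLineA "STATUS" (ek.1 + 2, ek.2)) proto_str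
  let proto_str := proto_str ++ "}\n\n"
  let proto_str := proto_str ++ "//Contains data for Pokemon Weathers\n"
  let proto_str := proto_str ++ "enum DexWeather {\n"
  let proto_str := proto_str ++ "\tWEATHER_UNASSIGNED = 0;\n"
  let proto_str := proto_str ++ "\tWEATHER_NONE = 1;\n"
  let filtered_data := condition_data.foldl
    (fun d p => if pvGetEffect p.2 == some "Weather" then d.insert p.1 p.2 else d) PySem.Dict.empty
  let proto_str := (PySem.List.enumerate filtered_data.keys 0).foldl
    (fun s ek => s ++ pvLineA "WEATHER" (ek.1 + 2, ek.2)) proto_str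
  let proto_str := proto_str ++ "}\n\n"
  let proto_str := proto_str ++ "//Contains data for Pokemon Conditions\n"
  let proto_str := proto_str ++ "enum DexCondition {\n"
  let proto_str := proto_str ++ "\tCONDITION_UNASSIGNED = 0;\n"
  let filtered_data := condition_data.foldl
    (fun d p => if pvGetEffect p.2 == none then d.insert p.1 p.2 else d) PySem.Dict.empty
  let proto_str := (PySem.List.enumerate filtered_data.keys 0).foldl
    (fun s ek => s ++ pvLineA "CONDITION" (ek.1 + 1, ek.2)) proto_str
  let proto_str := proto_str ++ "}\n\n"
  proto_str

-- ===== PORT B =====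
-- the classifying pass of Source B: one fold appending each key to its bin
def pvClassify (condition_data : List (String × List (String × String))) :
    List String × List String × List String :=
  condition_data.foldl
    (fun acc p =>
      let et := pvGetEffect p.2
      if et == some "Status" then (acc.1 ++ [p.1], acc.2.1, acc.2.2)
      else if et == some "Weather" then (acc.1, acc.2.1 ++ [p.1], acc.2.2)
      else if et == none then (acc.1, acc.2.1, acc.2.2 ++ [p.1])
      else acc)
    ([], [], [])

-- Source B's block helper: lines built as a list, then "".join
def pvBlock (title name : String) (prelude : List String) (pre : String)
    (keys : List String) (start : Int) : String :=
  PySem.Str.join ""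
    (["//Contains data for Pokemon " ++ title ++ "\n", "enum " ++ name ++ " {\n"]
      ++ prelude
      ++ (PySem.List.enumerate keys start).map
          (fun ik => "\t" ++ pre ++ "_" ++ PySem.Str.upper ik.2 ++ " = " ++ PySem.Int.toStr ik.1 ++ ";\n")
      ++ ["}\n\n"])

def protogen_conditions_alt (condition_data : List (String × List (String × String))) : String :=
  let bins := pvClassify condition_data
  pvBlock "Statuses" "DexStatus" ["\tSTATUS_UNASSIGNED = 0;\n", "\tSTATUS_FNT = 1;\n"]
      "STATUS" bins.1 2
    ++ pvBlock "Weathers" "DexWeather" ["\tWEATHER_UNASSIGNED = 0;\n", "\tWEATHER_NONE = 1;\n"]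
      "WEATHER" bins.2.1 2
    ++ pvBlock "Conditions" "DexCondition" ["\tCONDITION_UNASSIGNED = 0;\n"]
      "CONDITION" bins.2.2 1

-- ===== PRECONDITION & SPEC =====
-- The Python argument is a dict, so its keys are distinct; Pre_ states exactly that
-- dict-representation invariant for the association list (it excludes no Python input).
def Pre_protogen_conditions (condition_data : List (String × List (String × String))) : Prop :=
  (condition_data.map (·.1)).Nodup

instance (condition_data : List (String × List (String × String))) : Decidable (Pre_protogen_conditions condition_data) := by unfold Pre_protogen_conditions; infer_instance

def pvWitness_protogen_conditions : (List (String × List (String × String))) :=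
  [("brn", [("effectType", "Status")]), ("hail", [("effectType", "Weather")]), ("trapped", [])]

def Spec_protogen_conditions (condition_data : List (String × List (String × String))) (out : String) : Prop := out = protogen_conditions_alt condition_data
instance (condition_data : List (String × List (String × String))) (out : String) : Decidable (Spec_protogen_conditions condition_data out) := by unfold Spec_protogen_conditions; infer_instance

-- ===== CLAIM (what is proved, stated in full; the proofs are below) =====
def Claim_equal_protogen_conditions : Prop := ∀ (condition_data : List (String × List (String × String))), Dom_protogen_conditions condition_data → Pre_protogen_conditions condition_data → Spec_protogen_conditions condition_data (protogen_conditions condition_data)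

-- ===== LEMMAS AND PROOFS =====

-- "".join at the String level: empty, cons, append
theorem pv_join_nil : PySem.Str.join "" ([] : List String) = "" := by
  rw [← String.toList_inj]
  simp [PySem.Str.toList_join, PySem.Chars.join_nil]

theorem pv_join_cons (a : String) (l : List String) :
    PySem.Str.join "" (a :: l) = a ++ PySem.Str.join "" l := by
  rw [← String.toList_inj]
  cases l with
  | nil =>
      simp [PySem.Str.toList_join, PySem.Chars.join_singleton, PySem.Chars.join_nil]
  | cons b t =>
      simp [PySem.Str.toList_join, PySem.Chars.join_cons_cons, String.toList_append]

theorem pv_join_append (l m : List String) :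
    PySem.Str.join "" (l ++ m) = PySem.Str.join "" l ++ PySem.Str.join "" m := by
  induction l with
  | nil => simp [pv_join_nil]
  | cons a t ih => simp [pv_join_cons, ih, String.append_assoc]

-- A's line-emitting fold is the "".join of the mapped lines
theorem pv_foldl_lines (f : Int × String → String) :
    ∀ (l : List (Int × String)) (s : String),
      l.foldl (fun s ik => s ++ f ik) s = s ++ PySem.Str.join "" (l.map f)
  | [], s => by simp [pv_join_nil]
  | x :: l, s => by
      simp only [List.foldl_cons, List.map_cons]
      rw [pv_foldl_lines f l (s ++ f x), pv_join_cons, String.append_assoc]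

-- shifting the enumeration start into the emitted index
theorem pv_map_line (pre : String) (c : Int) :
    ∀ (ks : List String) (s : Int),
      (PySem.List.enumerate ks s).map (fun ek => pvLineA pre (ek.1 + c, ek.2))
        = (PySem.List.enumerate ks (s + c)).map (fun ik => pvLineA pre ik)
  | [], s => by simp [PySem.List.enumerate_nil]
  | k :: ks, s => by
      rw [PySem.List.enumerate_cons, PySem.List.enumerate_cons]
      simp only [List.map_cons]
      rw [pv_map_line pre c ks (s + 1)]
      have h : s + 1 + c = s + c + 1 := by ring
      rw [h]

-- keys of A's filter-comprehension dict, for distinct input keys, are the filtered key list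
theorem pv_keys_filter_dict (P : List (String × String) → Bool) :
    ∀ (cd : List (String × List (String × String))) (d : PySem.Dict String (List (String × String))),
      d.keys.Nodup → ((cd.map (·.1)).Nodup) → (∀ p ∈ cd, d.contains p.1 = false) →
      (cd.foldl (fun d p => if P p.2 then d.insert p.1 p.2 else d) d).keys
        = d.keys ++ (cd.filter (fun p => P p.2)).map (·.1)
  | [], d => by intro _ _ _; simp
  | p :: cd, d => by
      intro hd hnd hc
      simp only [List.map_cons, List.nodup_cons] at hnd
      simp only [List.foldl_cons, List.filter_cons]
      by_cases hP : P p.2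
      · have hfresh : d.contains p.1 = false := hc p (by simp)
        have hkeys := PySem.Dict.keys_insert_of_not_contains d p.2 hfresh
        rw [if_pos hP]
        rw [pv_keys_filter_dict P cd (d.insert p.1 p.2)
            (PySem.Dict.nodup_keys_insert d p.1 p.2 hd) hnd.2
            (by
              intro q hq
              rw [PySem.Dict.contains_insert]
              have hne : q.1 ≠ p.1 := by
                intro he
                exact hnd.1 (he ▸ List.mem_map_of_mem hq)
              simp [hne, hc q (by simp [hq])])]
        rw [hkeys]
        simp [hP, List.append_assoc]
      · rw [if_neg hP]
        rw [pv_keys_filter_dict P cd d hd hnd.2 (fun q hq => hc q (by simp [hq]))]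
        simp [hP]

-- the three bins of B's classifying pass are the three filtered key lists
theorem pv_classify_aux :
    ∀ (cd : List (String × List (String × String))) (acc : List String × List String × List String),
      cd.foldl (fun acc p =>
          let et := pvGetEffect p.2
          if et == some "Status" then (acc.1 ++ [p.1], acc.2.1, acc.2.2)
          else if et == some "Weather" then (acc.1, acc.2.1 ++ [p.1], acc.2.2)
          else if et == none then (acc.1, acc.2.1, acc.2.2 ++ [p.1])
          else acc) acc
        = (acc.1 ++ (cd.filter (fun p => pvGetEffect p.2 == some "Status")).map (·.1),
           acc.2.1 ++ (cd.filter (fun p => pvGetEffect p.2 == some "Weather")).map (·.1),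
           acc.2.2 ++ (cd.filter (fun p => pvGetEffect p.2 == none)).map (·.1))
  | [], acc => by simp
  | p :: cd, acc => by
      simp only [List.foldl_cons, List.filter_cons]
      rcases h : pvGetEffect p.2 with _ | et
      · rw [if_neg (by decide), if_neg (by decide), if_pos (by decide)]
        rw [pv_classify_aux cd]
        simp
      · by_cases hs : et = "Status"
        · subst hs
          rw [if_pos (by decide)]
          rw [pv_classify_aux cd]
          simp
        · by_cases hw : et = "Weather"
          · subst hw
            rw [if_neg (by decide), if_pos (by decide)]
            rw [pv_classify_aux cd]
            simp
          · rw [if_neg (by simp [hs]), if_neg (by simp [hw]), if_neg (by simp)]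
            rw [pv_classify_aux cd]
            simp [hs, hw]

theorem pv_classify_eq (cd : List (String × List (String × String))) :
    pvClassify cd =
      ((cd.filter (fun p => pvGetEffect p.2 == some "Status")).map (·.1),
       (cd.filter (fun p => pvGetEffect p.2 == some "Weather")).map (·.1),
       (cd.filter (fun p => pvGetEffect p.2 == none)).map (·.1)) := by
  unfold pvClassify
  simpa using pv_classify_aux cd ([], [], [])

-- ===== VERDICT (by name: the statement is the Claim_ definition above) =====
theorem protogen_conditions_spec : Claim_equal_protogen_conditions := by
  intro cd _hdom hpre
  show protogen_conditions cd = protogen_conditions_alt cd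
  unfold protogen_conditions protogen_conditions_alt
  rw [pv_classify_eq]
  unfold pvBlock
  simp only []
  rw [pv_keys_filter_dict (fun v => pvGetEffect v == some "Status") cd PySem.Dict.empty
        PySem.Dict.nodup_keys_empty hpre (fun p _ => PySem.Dict.contains_empty _),
      pv_keys_filter_dict (fun v => pvGetEffect v == some "Weather") cd PySem.Dict.empty
        PySem.Dict.nodup_keys_empty hpre (fun p _ => PySem.Dict.contains_empty _),
      pv_keys_filter_dict (fun v => pvGetEffect v == none) cd PySem.Dict.empty
        PySem.Dict.nodup_keys_empty hpre (fun p _ => PySem.Dict.contains_empty _)]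
  simp only [PySem.Dict.keys_empty, List.nil_append]
  rw [pv_foldl_lines (fun ek => pvLineA "STATUS" (ek.1 + 2, ek.2)),
      pv_foldl_lines (fun ek => pvLineA "WEATHER" (ek.1 + 2, ek.2)),
      pv_foldl_lines (fun ek => pvLineA "CONDITION" (ek.1 + 1, ek.2))]
  rw [pv_map_line "STATUS" 2 _ 0, pv_map_line "WEATHER" 2 _ 0, pv_map_line "CONDITION" 1 _ 0,
      zero_add, zero_add]
  simp only [pv_join_append, pv_join_cons, pv_join_nil]
  have e1 : ("//Contains data for Pokemon " ++ "Statuses" ++ "\n" : String)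
      = "//Contains data for Pokemon Statuses\n" := by decide
  have e2 : ("enum " ++ "DexStatus" ++ " {\n" : String) = "enum DexStatus {\n" := by decide
  have e3 : ("//Contains data for Pokemon " ++ "Weathers" ++ "\n" : String)
      = "//Contains data for Pokemon Weathers\n" := by decide
  have e4 : ("enum " ++ "DexWeather" ++ " {\n" : String) = "enum DexWeather {\n" := by decide
  have e5 : ("//Contains data for Pokemon " ++ "Conditions" ++ "\n" : String)
      = "//Contains data for Pokemon Conditions\n" := by decide
  have e6 : ("enum " ++ "DexCondition" ++ " {\n" : String) = "enum DexCondition {\n" := by decide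
  have e0 : ∀ s : String, "" ++ s = s := fun s => by simp
  have e7 : ∀ s : String, s ++ "" = s := fun s => by simp
  simp only [e0, e7, e1, e2, e3, e4, e5, e6, pvLineA, String.append_assoc]
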